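-- pv_equiv track=rewrite | github.com/pypi-data/pypi-mirror-404 | packages/aiptx/aiptx-3.6.0-py3-none-any.whl/aipt_v2/intelligence/llm_crawler_analyzer.py | _categorize_endpoints
-- ===== SOURCE A (Python) =====
-- def _categorize_endpoints(endpoints: list[str]) -> dict[str, list[str]]:
--     """Categorize endpoints by type."""
--     categories = {
--         "api": [],
--         "admin": [],
--         "auth": [],
--         "user": [],
--         "upload": [],
--         "search": [],
--         "other": [],
--     }
--
--     for endpoint in endpoints:
--         ep_lower = endpoint.lower()
--
--         if "/api/" in ep_lower or "/v1/" in ep_lower or "/v2/" in ep_lower: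
--             categories["api"].append(endpoint)
--         elif "/admin" in ep_lower or "/dashboard" in ep_lower or "/manage" in ep_lower:
--             categories["admin"].append(endpoint)
--         elif "/login" in ep_lower or "/auth" in ep_lower or "/signin" in ep_lower or "/signup" in ep_lower:
--             categories["auth"].append(endpoint)
--         elif "/user" in ep_lower or "/profile" in ep_lower or "/account" in ep_lower:
--             categories["user"].append(endpoint)
--         elif "/upload" in ep_lower or "/file" in ep_lower or "/media" in ep_lower:
--             categories["upload"].append(endpoint)
--         elif "/search" in ep_lower or "?q=" in ep_lower or "?query=" in ep_lower:
--             categories["search"].append(endpoint)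
--         else:
--             categories["other"].append(endpoint)
--
--     # Remove empty categories
--     return {k: v for k, v in categories.items() if v}
-- ===== SOURCE B (Python) =====
-- # Data-driven rewrite: the elif chain becomes an ordered rule table; each endpoint is
-- # classified once, then the result is built category-by-category in rule order.
-- _RULES = [
--     ("api", ["/api/", "/v1/", "/v2/"]),
--     ("admin", ["/admin", "/dashboard", "/manage"]),
--     ("auth", ["/login", "/auth", "/signin", "/signup"]),
--     ("user", ["/user", "/profile", "/account"]),
--     ("upload", ["/upload", "/file", "/media"]),
--     ("search", ["/search", "?q=", "?query="]),
-- ]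
--
--
-- def _classify(ep_lower: str) -> str:
--     for name, patterns in _RULES:
--         if any(p in ep_lower for p in patterns):
--             return name
--     return "other"
--
--
-- def _categorize_endpoints(endpoints: list[str]) -> dict[str, list[str]]:
--     labels = [_classify(ep.lower()) for ep in endpoints]
--     result = {}
--     for name in [n for n, _ in _RULES] + ["other"]:
--         matched = [ep for ep, lab in zip(endpoints, labels) if lab == name]
--         if matched:
--             result[name] = matched
--     return result
-- ===== Notes on version B (the rewrite author's own statement) =====
-- stated objective: simpler
-- what changed: The seven-branch elif chain over a mutable dict is replaced by an ordered rule table: a first-match classifier over (category, patterns) pairs, with the result built per category by one filter pass each, so no pre-seeded dict or empty-category cleanup is needed.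
import Mathlib
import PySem

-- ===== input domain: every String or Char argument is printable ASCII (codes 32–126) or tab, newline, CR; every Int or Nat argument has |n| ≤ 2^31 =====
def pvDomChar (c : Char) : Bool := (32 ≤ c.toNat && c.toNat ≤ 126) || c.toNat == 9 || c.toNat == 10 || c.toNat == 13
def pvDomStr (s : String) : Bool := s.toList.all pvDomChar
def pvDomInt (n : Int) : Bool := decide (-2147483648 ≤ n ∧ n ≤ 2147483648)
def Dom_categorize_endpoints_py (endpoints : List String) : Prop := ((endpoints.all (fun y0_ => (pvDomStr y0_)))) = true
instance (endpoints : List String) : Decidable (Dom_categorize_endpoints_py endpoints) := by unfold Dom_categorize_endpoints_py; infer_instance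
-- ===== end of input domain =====

-- B replaces A's seven-branch elif chain over a pre-seeded dict by an ordered rule table with a
-- first-match classifier, building the result one category at a time (simpler, data-driven).

-- ===== PORT A =====
-- `categories[k].append(endpoint)` on the fixed-key dict (dict ported as assoc list in insertion order)
def pvAppendTo (cats : List (String × List String)) (k : String) (e : String) : List (String × List String) :=
  cats.map (fun kv => if kv.1 == k then (kv.1, kv.2 ++ [e]) else kv)

-- one iteration of A's loop: lower the endpoint, dispatch through the elif chain
def pvStepA (cats : List (String × List String)) (endpoint : String) : List (String × List String) :=
  let ep := PySem.Str.lower endpoint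
  if PySem.Str.isIn "/api/" ep || PySem.Str.isIn "/v1/" ep || PySem.Str.isIn "/v2/" ep then
    pvAppendTo cats "api" endpoint
  else if PySem.Str.isIn "/admin" ep || PySem.Str.isIn "/dashboard" ep || PySem.Str.isIn "/manage" ep then
    pvAppendTo cats "admin" endpoint
  else if PySem.Str.isIn "/login" ep || PySem.Str.isIn "/auth" ep || PySem.Str.isIn "/signin" ep || PySem.Str.isIn "/signup" ep then
    pvAppendTo cats "auth" endpoint
  else if PySem.Str.isIn "/user" ep || PySem.Str.isIn "/profile" ep || PySem.Str.isIn "/account" ep then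
    pvAppendTo cats "user" endpoint
  else if PySem.Str.isIn "/upload" ep || PySem.Str.isIn "/file" ep || PySem.Str.isIn "/media" ep then
    pvAppendTo cats "upload" endpoint
  else if PySem.Str.isIn "/search" ep || PySem.Str.isIn "?q=" ep || PySem.Str.isIn "?query=" ep then
    pvAppendTo cats "search" endpoint
  else
    pvAppendTo cats "other" endpoint

def categorize_endpoints_py (endpoints : List String) : List (String × List String) :=
  let categories : List (String × List String) :=
    [("api", []), ("admin", []), ("auth", []), ("user", []), ("upload", []), ("search", []), ("other", [])]
  let final := endpoints.foldl pvStepA categories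
  -- `{k: v for k, v in categories.items() if v}`: keys are unique, so the dict comprehension
  -- is exactly a filter of the items by non-emptiness (Python truthiness of a list)
  final.filter (fun kv => !kv.2.isEmpty)

-- ===== PORT B =====
def pvRules : List (String × List String) :=
  [("api", ["/api/", "/v1/", "/v2/"]),
   ("admin", ["/admin", "/dashboard", "/manage"]),
   ("auth", ["/login", "/auth", "/signin", "/signup"]),
   ("user", ["/user", "/profile", "/account"]),
   ("upload", ["/upload", "/file", "/media"]),
   ("search", ["/search", "?q=", "?query="])]

-- first rule any of whose patterns occurs in ep_lower; "other" if none matches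
def pvClassify (epLower : String) : String :=
  match pvRules.find? (fun r => r.2.any (fun p => PySem.Str.isIn p epLower)) with
  | some r => r.1
  | none => "other"

def categorize_endpoints_py_alt (endpoints : List String) : List (String × List String) :=
  let labels := endpoints.map (fun ep => pvClassify (PySem.Str.lower ep))
  (pvRules.map Prod.fst ++ ["other"]).filterMap (fun name =>
    let matched := ((endpoints.zip labels).filter (fun p => p.2 == name)).map Prod.fst
    if matched.isEmpty then none else some (name, matched))

-- ===== PRECONDITION & SPEC =====
def Spec_categorize_endpoints_py (endpoints : List String) (out : List (String × List String)) : Prop := out = categorize_endpoints_py_alt endpoints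
instance (endpoints : List String) (out : List (String × List String)) : Decidable (Spec_categorize_endpoints_py endpoints out) := by unfold Spec_categorize_endpoints_py; infer_instance

-- ===== CLAIM (what is proved, stated in full; the proofs are below) =====
def Claim_equal_categorize_endpoints_py : Prop := ∀ (endpoints : List String), Dom_categorize_endpoints_py endpoints → Spec_categorize_endpoints_py endpoints (categorize_endpoints_py endpoints)

-- ===== LEMMAS AND PROOFS =====

-- the per-category sublist both programs compute
def pvF (endpoints : List String) (name : String) : List String :=
  endpoints.filter (fun ep => pvClassify (PySem.Str.lower ep) == name)

lemma pvF_cons (e : String) (t : List String) (n : String) :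
    pvF (e :: t) n = if pvClassify (PySem.Str.lower e) == n then e :: pvF t n else pvF t n := by
  simp [pvF, List.filter_cons]

lemma pvOr3 : ∀ a b c : Bool, (a || (b || (c || false))) = (a || b || c) := by decide

lemma pvOr4 : ∀ a b c d : Bool, (a || (b || (c || (d || false)))) = (a || b || c || d) := by decide

lemma pvCl1 (ep : String)
    (h1 : (PySem.Str.isIn "/api/" ep || PySem.Str.isIn "/v1/" ep || PySem.Str.isIn "/v2/" ep) = true) :
    pvClassify ep = "api" := by
  unfold pvClassify pvRules
  rw [List.find?_cons_of_pos]
  simp only [List.any_cons, List.any_nil, pvOr3]; exact h1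

lemma pvCl2 (ep : String)
    (h1 : (PySem.Str.isIn "/api/" ep || PySem.Str.isIn "/v1/" ep || PySem.Str.isIn "/v2/" ep) = false)
    (h2 : (PySem.Str.isIn "/admin" ep || PySem.Str.isIn "/dashboard" ep || PySem.Str.isIn "/manage" ep) = true) :
    pvClassify ep = "admin" := by
  unfold pvClassify pvRules
  rw [List.find?_cons_of_neg, List.find?_cons_of_pos]
  · simp only [List.any_cons, List.any_nil, pvOr3]; exact h2
  · simp only [List.any_cons, List.any_nil, pvOr3, h1]; exact Bool.false_ne_true

lemma pvCl3 (ep : String)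
    (h1 : (PySem.Str.isIn "/api/" ep || PySem.Str.isIn "/v1/" ep || PySem.Str.isIn "/v2/" ep) = false)
    (h2 : (PySem.Str.isIn "/admin" ep || PySem.Str.isIn "/dashboard" ep || PySem.Str.isIn "/manage" ep) = false)
    (h3 : (PySem.Str.isIn "/login" ep || PySem.Str.isIn "/auth" ep || PySem.Str.isIn "/signin" ep || PySem.Str.isIn "/signup" ep) = true) :
    pvClassify ep = "auth" := by
  unfold pvClassify pvRules
  rw [List.find?_cons_of_neg, List.find?_cons_of_neg, List.find?_cons_of_pos]
  · simp only [List.any_cons, List.any_nil, pvOr4]; exact h3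
  · simp only [List.any_cons, List.any_nil, pvOr3, h2]; exact Bool.false_ne_true
  · simp only [List.any_cons, List.any_nil, pvOr3, h1]; exact Bool.false_ne_true

lemma pvCl4 (ep : String)
    (h1 : (PySem.Str.isIn "/api/" ep || PySem.Str.isIn "/v1/" ep || PySem.Str.isIn "/v2/" ep) = false)
    (h2 : (PySem.Str.isIn "/admin" ep || PySem.Str.isIn "/dashboard" ep || PySem.Str.isIn "/manage" ep) = false)
    (h3 : (PySem.Str.isIn "/login" ep || PySem.Str.isIn "/auth" ep || PySem.Str.isIn "/signin" ep || PySem.Str.isIn "/signup" ep) = false)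
    (h4 : (PySem.Str.isIn "/user" ep || PySem.Str.isIn "/profile" ep || PySem.Str.isIn "/account" ep) = true) :
    pvClassify ep = "user" := by
  unfold pvClassify pvRules
  rw [List.find?_cons_of_neg, List.find?_cons_of_neg, List.find?_cons_of_neg, List.find?_cons_of_pos]
  · simp only [List.any_cons, List.any_nil, pvOr3]; exact h4
  · simp only [List.any_cons, List.any_nil, pvOr4, h3]; exact Bool.false_ne_true
  · simp only [List.any_cons, List.any_nil, pvOr3, h2]; exact Bool.false_ne_true
  · simp only [List.any_cons, List.any_nil, pvOr3, h1]; exact Bool.false_ne_true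

lemma pvCl5 (ep : String)
    (h1 : (PySem.Str.isIn "/api/" ep || PySem.Str.isIn "/v1/" ep || PySem.Str.isIn "/v2/" ep) = false)
    (h2 : (PySem.Str.isIn "/admin" ep || PySem.Str.isIn "/dashboard" ep || PySem.Str.isIn "/manage" ep) = false)
    (h3 : (PySem.Str.isIn "/login" ep || PySem.Str.isIn "/auth" ep || PySem.Str.isIn "/signin" ep || PySem.Str.isIn "/signup" ep) = false)
    (h4 : (PySem.Str.isIn "/user" ep || PySem.Str.isIn "/profile" ep || PySem.Str.isIn "/account" ep) = false)
    (h5 : (PySem.Str.isIn "/upload" ep || PySem.Str.isIn "/file" ep || PySem.Str.isIn "/media" ep) = true) :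
    pvClassify ep = "upload" := by
  unfold pvClassify pvRules
  rw [List.find?_cons_of_neg, List.find?_cons_of_neg, List.find?_cons_of_neg, List.find?_cons_of_neg, List.find?_cons_of_pos]
  · simp only [List.any_cons, List.any_nil, pvOr3]; exact h5
  · simp only [List.any_cons, List.any_nil, pvOr3, h4]; exact Bool.false_ne_true
  · simp only [List.any_cons, List.any_nil, pvOr4, h3]; exact Bool.false_ne_true
  · simp only [List.any_cons, List.any_nil, pvOr3, h2]; exact Bool.false_ne_true
  · simp only [List.any_cons, List.any_nil, pvOr3, h1]; exact Bool.false_ne_true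

lemma pvCl6 (ep : String)
    (h1 : (PySem.Str.isIn "/api/" ep || PySem.Str.isIn "/v1/" ep || PySem.Str.isIn "/v2/" ep) = false)
    (h2 : (PySem.Str.isIn "/admin" ep || PySem.Str.isIn "/dashboard" ep || PySem.Str.isIn "/manage" ep) = false)
    (h3 : (PySem.Str.isIn "/login" ep || PySem.Str.isIn "/auth" ep || PySem.Str.isIn "/signin" ep || PySem.Str.isIn "/signup" ep) = false)
    (h4 : (PySem.Str.isIn "/user" ep || PySem.Str.isIn "/profile" ep || PySem.Str.isIn "/account" ep) = false)
    (h5 : (PySem.Str.isIn "/upload" ep || PySem.Str.isIn "/file" ep || PySem.Str.isIn "/media" ep) = false)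
    (h6 : (PySem.Str.isIn "/search" ep || PySem.Str.isIn "?q=" ep || PySem.Str.isIn "?query=" ep) = true) :
    pvClassify ep = "search" := by
  unfold pvClassify pvRules
  rw [List.find?_cons_of_neg, List.find?_cons_of_neg, List.find?_cons_of_neg, List.find?_cons_of_neg, List.find?_cons_of_neg, List.find?_cons_of_pos]
  · simp only [List.any_cons, List.any_nil, pvOr3]; exact h6
  · simp only [List.any_cons, List.any_nil, pvOr3, h5]; exact Bool.false_ne_true
  · simp only [List.any_cons, List.any_nil, pvOr3, h4]; exact Bool.false_ne_true
  · simp only [List.any_cons, List.any_nil, pvOr4, h3]; exact Bool.false_ne_true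
  · simp only [List.any_cons, List.any_nil, pvOr3, h2]; exact Bool.false_ne_true
  · simp only [List.any_cons, List.any_nil, pvOr3, h1]; exact Bool.false_ne_true

lemma pvCl7 (ep : String)
    (h1 : (PySem.Str.isIn "/api/" ep || PySem.Str.isIn "/v1/" ep || PySem.Str.isIn "/v2/" ep) = false)
    (h2 : (PySem.Str.isIn "/admin" ep || PySem.Str.isIn "/dashboard" ep || PySem.Str.isIn "/manage" ep) = false)
    (h3 : (PySem.Str.isIn "/login" ep || PySem.Str.isIn "/auth" ep || PySem.Str.isIn "/signin" ep || PySem.Str.isIn "/signup" ep) = false)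
    (h4 : (PySem.Str.isIn "/user" ep || PySem.Str.isIn "/profile" ep || PySem.Str.isIn "/account" ep) = false)
    (h5 : (PySem.Str.isIn "/upload" ep || PySem.Str.isIn "/file" ep || PySem.Str.isIn "/media" ep) = false)
    (h6 : (PySem.Str.isIn "/search" ep || PySem.Str.isIn "?q=" ep || PySem.Str.isIn "?query=" ep) = false) :
    pvClassify ep = "other" := by
  unfold pvClassify pvRules
  rw [List.find?_cons_of_neg, List.find?_cons_of_neg, List.find?_cons_of_neg, List.find?_cons_of_neg, List.find?_cons_of_neg, List.find?_cons_of_neg]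
  · rfl
  · simp only [List.any_cons, List.any_nil, pvOr3, h6]; exact Bool.false_ne_true
  · simp only [List.any_cons, List.any_nil, pvOr3, h5]; exact Bool.false_ne_true
  · simp only [List.any_cons, List.any_nil, pvOr3, h4]; exact Bool.false_ne_true
  · simp only [List.any_cons, List.any_nil, pvOr4, h3]; exact Bool.false_ne_true
  · simp only [List.any_cons, List.any_nil, pvOr3, h2]; exact Bool.false_ne_true
  · simp only [List.any_cons, List.any_nil, pvOr3, h1]; exact Bool.false_ne_true

-- A's elif chain appends the endpoint to exactly the category pvClassify names
lemma pvStep_eq (cats : List (String × List String)) (e : String) :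
    pvStepA cats e = pvAppendTo cats (pvClassify (PySem.Str.lower e)) e := by
  simp only [pvStepA]
  cases h1 : (PySem.Str.isIn "/api/" (PySem.Str.lower e) || PySem.Str.isIn "/v1/" (PySem.Str.lower e) || PySem.Str.isIn "/v2/" (PySem.Str.lower e)) with
  | true => rw [if_pos rfl, pvCl1 _ h1]
  | false =>
  rw [if_neg (by simp)]
  cases h2 : (PySem.Str.isIn "/admin" (PySem.Str.lower e) || PySem.Str.isIn "/dashboard" (PySem.Str.lower e) || PySem.Str.isIn "/manage" (PySem.Str.lower e)) with
  | true => rw [if_pos rfl, pvCl2 _ h1 h2]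
  | false =>
  rw [if_neg (by simp)]
  cases h3 : (PySem.Str.isIn "/login" (PySem.Str.lower e) || PySem.Str.isIn "/auth" (PySem.Str.lower e) || PySem.Str.isIn "/signin" (PySem.Str.lower e) || PySem.Str.isIn "/signup" (PySem.Str.lower e)) with
  | true => rw [if_pos rfl, pvCl3 _ h1 h2 h3]
  | false =>
  rw [if_neg (by simp)]
  cases h4 : (PySem.Str.isIn "/user" (PySem.Str.lower e) || PySem.Str.isIn "/profile" (PySem.Str.lower e) || PySem.Str.isIn "/account" (PySem.Str.lower e)) with
  | true => rw [if_pos rfl, pvCl4 _ h1 h2 h3 h4]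
  | false =>
  rw [if_neg (by simp)]
  cases h5 : (PySem.Str.isIn "/upload" (PySem.Str.lower e) || PySem.Str.isIn "/file" (PySem.Str.lower e) || PySem.Str.isIn "/media" (PySem.Str.lower e)) with
  | true => rw [if_pos rfl, pvCl5 _ h1 h2 h3 h4 h5]
  | false =>
  rw [if_neg (by simp)]
  cases h6 : (PySem.Str.isIn "/search" (PySem.Str.lower e) || PySem.Str.isIn "?q=" (PySem.Str.lower e) || PySem.Str.isIn "?query=" (PySem.Str.lower e)) with
  | true => rw [if_pos rfl, pvCl6 _ h1 h2 h3 h4 h5 h6]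
  | false =>
  rw [if_neg (by simp), pvCl7 _ h1 h2 h3 h4 h5 h6]

-- pvAppendTo on the seven-key table, for an arbitrary key
lemma pvAppendTo_lit (k e : String) (a1 a2 a3 a4 a5 a6 a7 : List String) :
    pvAppendTo [("api", a1), ("admin", a2), ("auth", a3), ("user", a4), ("upload", a5), ("search", a6), ("other", a7)] k e =
    [("api", if "api" == k then a1 ++ [e] else a1), ("admin", if "admin" == k then a2 ++ [e] else a2),
     ("auth", if "auth" == k then a3 ++ [e] else a3), ("user", if "user" == k then a4 ++ [e] else a4),
     ("upload", if "upload" == k then a5 ++ [e] else a5), ("search", if "search" == k then a6 ++ [e] else a6),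
     ("other", if "other" == k then a7 ++ [e] else a7)] := by
  simp only [pvAppendTo, List.map]
  split_ifs <;> rfl

-- one table entry after one appended endpoint, as the target filter shape
lemma pvEntry (a X : List String) (e c k : String) :
    (if c == k then a ++ [e] else a) ++ X = a ++ (if k == c then e :: X else X) := by
  by_cases hck : c = k
  · subst hck; simp
  · simp [hck, Ne.symm hck]

-- loop invariant for A's fold: each category's list grows by exactly the endpoints whose
-- first-match classification is that category, in order
lemma pvLoopA (es : List String) (a1 a2 a3 a4 a5 a6 a7 : List String) :
    es.foldl pvStepA [("api", a1), ("admin", a2), ("auth", a3), ("user", a4), ("upload", a5), ("search", a6), ("other", a7)] =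
    [("api", a1 ++ pvF es "api"), ("admin", a2 ++ pvF es "admin"), ("auth", a3 ++ pvF es "auth"),
     ("user", a4 ++ pvF es "user"), ("upload", a5 ++ pvF es "upload"), ("search", a6 ++ pvF es "search"),
     ("other", a7 ++ pvF es "other")] := by
  induction es generalizing a1 a2 a3 a4 a5 a6 a7 with
  | nil => simp [pvF]
  | cons e t ih =>
    rw [List.foldl_cons, pvStep_eq, pvAppendTo_lit, ih]
    simp only [pvF_cons, pvEntry]

-- zipping a list with its classifications and filtering on the label = filtering directly
lemma pvZip (f : String → String) (n : String) (es : List String) :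
    ((es.zip (es.map f)).filter (fun p => p.2 == n)).map Prod.fst =
    es.filter (fun e => f e == n) := by
  induction es with
  | nil => rfl
  | cons e t ih =>
    by_cases h : f e == n
    · simp [h, ih]
    · simp [h, ih]

-- filtering the (name, F name) table by non-emptiness = filterMap producing only non-empty entries
lemma pvBridge (F : String → List String) (names : List String) :
    (names.map (fun n => (n, F n))).filter (fun kv => !kv.2.isEmpty) =
    names.filterMap (fun n => if (F n).isEmpty then none else some (n, F n)) := by
  induction names with
  | nil => rfl
  | cons n t ih =>
    by_cases h : F n = []
    · simp [h, ih]
    · simp [h, ih]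

-- ===== VERDICT (by name: the statement is the Claim_ definition above) =====
theorem categorize_endpoints_py_spec : Claim_equal_categorize_endpoints_py := by
  intro endpoints _
  show categorize_endpoints_py endpoints = categorize_endpoints_py_alt endpoints
  simp only [categorize_endpoints_py]
  rw [pvLoopA]
  have hmap : [("api", pvF endpoints "api"), ("admin", pvF endpoints "admin"), ("auth", pvF endpoints "auth"),
      ("user", pvF endpoints "user"), ("upload", pvF endpoints "upload"), ("search", pvF endpoints "search"),
      ("other", pvF endpoints "other")] =
      (["api", "admin", "auth", "user", "upload", "search", "other"]).map (fun n => (n, pvF endpoints n)) := rfl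
  simp only [List.nil_append, hmap, pvBridge]
  simp only [categorize_endpoints_py_alt]
  refine (List.filterMap_congr ?_).symm
  intro n _
  rw [pvZip]
  rfl
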